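-- pv_equiv track=rewrite | github.com/pypi-data/pypi-mirror-403 | packages/dicompare/dicompare-0.1.45.tar.gz/dicompare-0.1.45/dicompare/validation/compliance.py | _find_column_match
-- ===== SOURCE A (Python) =====
-- from typing import List, Dict, Any, Optional
--
-- def _find_column_match(field_name: str, columns: List[str]) -> Optional[str]:
--     """
--     Find a matching column name, trying various normalizations.
--
--     Args:
--         field_name: Field name from schema (e.g., "Flip Angle")
--         columns: Available column names in DataFrame (e.g., ["FlipAngle"])
--
--     Returns:
--         Matching column name if found, None otherwise
--     """
--     # Try exact match first
--     if field_name in columns: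
--         return field_name
--
--     # Try without spaces
--     no_space = field_name.replace(' ', '')
--     if no_space in columns:
--         return no_space
--
--     # Try without underscores
--     no_underscore = field_name.replace('_', '')
--     if no_underscore in columns:
--         return no_underscore
--
--     # Try case-insensitive match
--     field_lower = field_name.lower()
--     for col in columns:
--         if col.lower() == field_lower:
--             return col
--
--     # Try case-insensitive without spaces/underscores
--     field_normalized = field_name.replace(' ', '').replace('_', '').lower()
--     for col in columns:
--         col_normalized = col.replace(' ', '').replace('_', '').lower()
--         if col_normalized == field_normalized:
--             return col
--
--     return None
-- ===== SOURCE B (Python) =====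
-- from typing import List, Optional
--
-- def _find_column_match(field_name: str, columns: List[str]) -> Optional[str]:
--     """Single pass: rank each column by match quality, keep the first best-ranked one."""
--     no_space = field_name.replace(' ', '')
--     no_underscore = field_name.replace('_', '')
--     field_lower = field_name.lower()
--     field_norm = field_name.replace(' ', '').replace('_', '').lower()
--     best_rank = 6
--     best_col = None
--     for col in columns:
--         if col == field_name:
--             rank = 1
--         elif col == no_space:
--             rank = 2
--         elif col == no_underscore:
--             rank = 3
--         elif col.lower() == field_lower:
--             rank = 4
--         elif col.replace(' ', '').replace('_', '').lower() == field_norm: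
--             rank = 5
--         else:
--             continue
--         if rank < best_rank:
--             best_rank = rank
--             best_col = col
--     return best_col
-- ===== Notes on version B (the rewrite author's own statement) =====
-- stated objective: alternative
-- what changed: Replaces A's five sequential whole-list passes (exact, no-space, no-underscore, lowercase, fully-normalized) by one scan that assigns each column a priority rank and keeps the running strictly-best-ranked column.
import Mathlib
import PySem

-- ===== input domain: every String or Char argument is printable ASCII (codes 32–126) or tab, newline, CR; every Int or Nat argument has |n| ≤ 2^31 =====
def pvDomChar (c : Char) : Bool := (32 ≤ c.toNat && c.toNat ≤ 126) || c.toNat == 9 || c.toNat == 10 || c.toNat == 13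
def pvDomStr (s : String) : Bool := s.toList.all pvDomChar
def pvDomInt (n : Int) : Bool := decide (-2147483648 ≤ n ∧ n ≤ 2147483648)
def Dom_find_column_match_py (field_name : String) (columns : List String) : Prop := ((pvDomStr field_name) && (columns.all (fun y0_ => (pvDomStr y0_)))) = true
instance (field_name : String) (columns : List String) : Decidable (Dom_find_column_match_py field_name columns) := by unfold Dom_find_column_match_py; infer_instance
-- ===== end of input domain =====

-- B replaces A's five sequential whole-list passes (exact / no-space / no-underscore / lowercase / normalized)
-- by a single scan that ranks each column and keeps the first best-ranked one (alternative decomposition, same results).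

-- ===== PORT A =====
def find_column_match_py (field_name : String) (columns : List String) : Option String :=
  if columns.contains field_name then some field_name
  else
    let no_space := PySem.Str.replace field_name " " ""
    if columns.contains no_space then some no_space
    else
      let no_underscore := PySem.Str.replace field_name "_" ""
      if columns.contains no_underscore then some no_underscore
      else
        let field_lower := PySem.Str.lower field_name
        match columns.find? (fun col => PySem.Str.lower col == field_lower) with
        | some col => some col
        | none =>
          let field_normalized := PySem.Str.lower (PySem.Str.replace (PySem.Str.replace field_name " " "") "_" "")
          match columns.find? (fun col => PySem.Str.lower (PySem.Str.replace (PySem.Str.replace col " " "") "_" "") == field_normalized) with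
          | some col => some col
          | none => none

-- ===== PORT B =====
-- rank of a column against the field name: 1 exact, 2 no-space, 3 no-underscore, 4 case-insensitive, 5 fully normalized; none = no match
def pvRank (field_name no_space no_underscore field_lower field_norm col : String) : Option Nat :=
  if col == field_name then some 1
  else if col == no_space then some 2
  else if col == no_underscore then some 3
  else if PySem.Str.lower col == field_lower then some 4
  else if PySem.Str.lower (PySem.Str.replace (PySem.Str.replace col " " "") "_" "") == field_norm then some 5
  else none

-- loop body of B: keep the running best, update only on a strictly smaller rank
def pvStep (field_name no_space no_underscore field_lower field_norm : String)
    (best : Option (Nat × String)) (col : String) : Option (Nat × String) :=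
  match pvRank field_name no_space no_underscore field_lower field_norm col with
  | none => best
  | some r =>
    match best with
    | none => some (r, col)
    | some (br, bc) => if r < br then some (r, col) else some (br, bc)

def find_column_match_py_alt (field_name : String) (columns : List String) : Option String :=
  let no_space := PySem.Str.replace field_name " " ""
  let no_underscore := PySem.Str.replace field_name "_" ""
  let field_lower := PySem.Str.lower field_name
  let field_norm := PySem.Str.lower (PySem.Str.replace no_space "_" "")
  (columns.foldl (pvStep field_name no_space no_underscore field_lower field_norm) none).map Prod.snd


-- ===== PRECONDITION & SPEC =====
def Spec_find_column_match_py (field_name : String) (columns : List String) (out : Option String) : Prop := out = find_column_match_py_alt field_name columns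
instance (field_name : String) (columns : List String) (out : Option String) : Decidable (Spec_find_column_match_py field_name columns out) := by unfold Spec_find_column_match_py; infer_instance

-- ===== CLAIM (what is proved, stated in full; the proofs are below) =====
def Claim_equal_find_column_match_py : Prop := ∀ (field_name : String) (columns : List String), Dom_find_column_match_py field_name columns → Spec_find_column_match_py field_name columns (find_column_match_py field_name columns)

-- ===== LEMMAS AND PROOFS =====

-- left-preferring minimum-by-rank combination of optional (rank, column) pairs
def pvMerge (b m : Option (Nat × String)) : Option (Nat × String) :=
  match m with
  | none => b
  | some (r, c) =>
    match b with
    | none => some (r, c)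
    | some (br, bc) => if r < br then some (r, c) else some (br, bc)

theorem pvMerge_none_left (m : Option (Nat × String)) : pvMerge none m = m := by
  rcases m with _ | ⟨r, c⟩ <;> rfl
theorem pvMerge_assoc (b x y : Option (Nat × String)) :
    pvMerge (pvMerge b x) y = pvMerge b (pvMerge x y) := by
  rcases b with _ | ⟨br, bc⟩ <;> rcases x with _ | ⟨xr, xc⟩ <;> rcases y with _ | ⟨yr, yc⟩ <;>
    simp only [pvMerge] <;> split_ifs <;>
    first
      | rfl
      | omega
      | (simp_all <;> first | rfl | omega | (split_ifs <;> first | rfl | omega))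
theorem pvStep_eq_merge (f t2 t3 fl fn : String) (b : Option (Nat × String)) (col : String) :
    pvStep f t2 t3 fl fn b col = pvMerge b ((pvRank f t2 t3 fl fn col).map (fun r => (r, col))) := by
  cases h : pvRank f t2 t3 fl fn col <;> cases b <;> simp [pvStep, pvMerge, h]
theorem pvFoldl_merge (f t2 t3 fl fn : String) (cs : List String) (b : Option (Nat × String)) :
    cs.foldl (pvStep f t2 t3 fl fn) b = pvMerge b (cs.foldl (pvStep f t2 t3 fl fn) none) := by
  induction cs generalizing b with
  | nil => simp [pvMerge]
  | cons c cs ih =>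
    simp only [List.foldl_cons]
    rw [ih (pvStep f t2 t3 fl fn b c), ih (pvStep f t2 t3 fl fn none c),
        pvStep_eq_merge, pvStep_eq_merge, pvMerge_none_left, pvMerge_assoc]

-- closed characterisation of B's fold: the five-level priority result
def pvChar (f : String) (cs : List String) : Option (Nat × String) :=
  if cs.contains f then some (1, f)
  else if cs.contains (PySem.Str.replace f " " "") then some (2, PySem.Str.replace f " " "")
  else if cs.contains (PySem.Str.replace f "_" "") then some (3, PySem.Str.replace f "_" "")
  else match cs.find? (fun col => PySem.Str.lower col == PySem.Str.lower f) with
       | some c => some (4, c)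
       | none =>
         match cs.find? (fun col => PySem.Str.lower (PySem.Str.replace (PySem.Str.replace col " " "") "_" "") == PySem.Str.lower (PySem.Str.replace (PySem.Str.replace f " " "") "_" "")) with
         | some c => some (5, c)
         | none => none


theorem pvChar_merge_one (f x : String) (cs : List String) :
    pvMerge (some (1, x)) (pvChar f cs) = some (1, x) := by
  simp only [pvChar]
  split_ifs <;>
    (try cases hA : List.find? (fun col => PySem.Str.lower col == PySem.Str.lower f) cs) <;>
    (try cases hB : List.find? (fun col => PySem.Str.lower (PySem.Str.replace (PySem.Str.replace col " " "") "_" "") == PySem.Str.lower (PySem.Str.replace (PySem.Str.replace f " " "") "_" "")) cs) <;>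
    simp [pvMerge]

theorem pvChar_merge_two (f x : String) (cs : List String) (h : cs.contains f = false) :
    pvMerge (some (2, x)) (pvChar f cs) = some (2, x) := by
  simp only [pvChar, h]
  split_ifs <;>
    (try cases hA : List.find? (fun col => PySem.Str.lower col == PySem.Str.lower f) cs) <;>
    (try cases hB : List.find? (fun col => PySem.Str.lower (PySem.Str.replace (PySem.Str.replace col " " "") "_" "") == PySem.Str.lower (PySem.Str.replace (PySem.Str.replace f " " "") "_" "")) cs) <;>
    simp_all [pvMerge]

theorem pvChar_merge_three (f x : String) (cs : List String) (h : cs.contains f = false)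
    (h2 : cs.contains (PySem.Str.replace f " " "") = false) :
    pvMerge (some (3, x)) (pvChar f cs) = some (3, x) := by
  simp only [pvChar, h, h2]
  split_ifs <;>
    (try cases hA : List.find? (fun col => PySem.Str.lower col == PySem.Str.lower f) cs) <;>
    (try cases hB : List.find? (fun col => PySem.Str.lower (PySem.Str.replace (PySem.Str.replace col " " "") "_" "") == PySem.Str.lower (PySem.Str.replace (PySem.Str.replace f " " "") "_" "")) cs) <;>
    simp_all [pvMerge]

theorem pvChar_merge_four (f x : String) (cs : List String) (h : cs.contains f = false)
    (h2 : cs.contains (PySem.Str.replace f " " "") = false)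
    (h3 : cs.contains (PySem.Str.replace f "_" "") = false) :
    pvMerge (some (4, x)) (pvChar f cs) = some (4, x) := by
  simp only [pvChar, h, h2, h3]
  (try cases hA : List.find? (fun col => PySem.Str.lower col == PySem.Str.lower f) cs) <;>
    (try cases hB : List.find? (fun col => PySem.Str.lower (PySem.Str.replace (PySem.Str.replace col " " "") "_" "") == PySem.Str.lower (PySem.Str.replace (PySem.Str.replace f " " "") "_" "")) cs) <;>
    simp_all [pvMerge]

theorem pvChar_merge_five (f x : String) (cs : List String) (h : cs.contains f = false)
    (h2 : cs.contains (PySem.Str.replace f " " "") = false)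
    (h3 : cs.contains (PySem.Str.replace f "_" "") = false) :
    pvMerge (some (5, x)) (pvChar f cs) =
      (match cs.find? (fun col => PySem.Str.lower col == PySem.Str.lower f) with
       | some c => some (4, c)
       | none => some (5, x)) := by
  simp only [pvChar, h, h2, h3]
  (try cases hA : List.find? (fun col => PySem.Str.lower col == PySem.Str.lower f) cs) <;>
    (try cases hB : List.find? (fun col => PySem.Str.lower (PySem.Str.replace (PySem.Str.replace col " " "") "_" "") == PySem.Str.lower (PySem.Str.replace (PySem.Str.replace f " " "") "_" "")) cs) <;>
    simp_all [pvMerge]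

set_option maxRecDepth 4096 in
theorem pvMchar (f : String) (cs : List String) :
    cs.foldl (pvStep f (PySem.Str.replace f " " "") (PySem.Str.replace f "_" "") (PySem.Str.lower f) (PySem.Str.lower (PySem.Str.replace (PySem.Str.replace f " " "") "_" ""))) none = pvChar f cs := by
  induction cs with
  | nil => simp [pvChar]
  | cons c cs ih =>
    simp only [List.foldl_cons]
    rw [pvFoldl_merge, ih, pvStep_eq_merge, pvMerge_none_left]
    simp only [pvRank]
    split_ifs with h1 h2 h3 h4 h5
    · -- rank 1: c = f
      rw [beq_iff_eq] at h1
      subst h1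
      simp only [Option.map_some]
      rw [pvChar_merge_one]
      simp [pvChar, List.contains_cons]
    · -- rank 2: c = no_space
      rw [beq_iff_eq] at h2
      subst h2
      have n1 : ¬ f = PySem.Str.replace f " " "" := fun hh => h1 (by simp [← hh])
      simp only [Option.map_some]
      by_cases hc : f ∈ cs
      · simp [pvChar, List.contains_cons, pvMerge, hc, n1]
      · rw [pvChar_merge_two f _ cs (by simpa using hc)]
        simp [pvChar, List.contains_cons, hc, n1]
    · -- rank 3: c = no_underscore
      rw [beq_iff_eq] at h3
      subst h3
      have n1 : ¬ f = PySem.Str.replace f "_" "" := fun hh => h1 (by simp [← hh])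
      have n2 : ¬ PySem.Str.replace f " " "" = PySem.Str.replace f "_" "" := fun hh => h2 (by simp [← hh])
      simp only [Option.map_some]
      by_cases hc : f ∈ cs
      · simp [pvChar, List.contains_cons, pvMerge, hc, n1, n2]
      · by_cases hc2 : PySem.Str.replace f " " "" ∈ cs
        · simp [pvChar, List.contains_cons, pvMerge, hc, hc2, n1, n2]
        · rw [pvChar_merge_three f _ cs (by simpa using hc) (by simpa using hc2)]
          simp [pvChar, List.contains_cons, hc, hc2, n1, n2]
    · -- rank 4: lowercase match
      have n1 : ¬ f = c := fun hh => h1 (by simp [← hh])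
      have n2 : ¬ PySem.Str.replace f " " "" = c := fun hh => h2 (by simp [← hh])
      have n3 : ¬ PySem.Str.replace f "_" "" = c := fun hh => h3 (by simp [← hh])
      simp only [Option.map_some]
      by_cases hc : f ∈ cs
      · simp [pvChar, List.contains_cons, pvMerge, hc, n1, n2, n3]
      · by_cases hc2 : PySem.Str.replace f " " "" ∈ cs
        · simp [pvChar, List.contains_cons, pvMerge, hc, hc2, n1, n2, n3]
        · by_cases hc3 : PySem.Str.replace f "_" "" ∈ cs
          · simp [pvChar, List.contains_cons, pvMerge, hc, hc2, hc3, n1, n2, n3]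
          · rw [pvChar_merge_four f _ cs (by simpa using hc) (by simpa using hc2) (by simpa using hc3)]
            have hf4 : List.find? (fun col => PySem.Str.lower col == PySem.Str.lower f) (c :: cs) = some c := by
              simp [List.find?_cons, h4]
            simp [pvChar, List.contains_cons, hc, hc2, hc3, n1, n2, n3, hf4]
    · -- rank 5: normalized match
      have n1 : ¬ f = c := fun hh => h1 (by simp [← hh])
      have n2 : ¬ PySem.Str.replace f " " "" = c := fun hh => h2 (by simp [← hh])
      have n3 : ¬ PySem.Str.replace f "_" "" = c := fun hh => h3 (by simp [← hh])
      simp only [Option.map_some]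
      by_cases hc : f ∈ cs
      · simp [pvChar, List.contains_cons, pvMerge, hc, n1, n2, n3]
      · by_cases hc2 : PySem.Str.replace f " " "" ∈ cs
        · simp [pvChar, List.contains_cons, pvMerge, hc, hc2, n1, n2, n3]
        · by_cases hc3 : PySem.Str.replace f "_" "" ∈ cs
          · simp [pvChar, List.contains_cons, pvMerge, hc, hc2, hc3, n1, n2, n3]
          · rw [pvChar_merge_five f _ cs (by simpa using hc) (by simpa using hc2) (by simpa using hc3)]
            have hf4 : List.find? (fun col => PySem.Str.lower col == PySem.Str.lower f) (c :: cs) = List.find? (fun col => PySem.Str.lower col == PySem.Str.lower f) cs := by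
              simp [List.find?_cons, h4]
            have hf5 : List.find? (fun col => PySem.Str.lower (PySem.Str.replace (PySem.Str.replace col " " "") "_" "") == PySem.Str.lower (PySem.Str.replace (PySem.Str.replace f " " "") "_" "")) (c :: cs) = some c := by
              simp [List.find?_cons, h5]
            simp [pvChar, List.contains_cons, hc, hc2, hc3, n1, n2, n3, hf4, hf5]
    · -- no match for c
      have n1 : ¬ f = c := fun hh => h1 (by simp [← hh])
      have n2 : ¬ PySem.Str.replace f " " "" = c := fun hh => h2 (by simp [← hh])
      have n3 : ¬ PySem.Str.replace f "_" "" = c := fun hh => h3 (by simp [← hh])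
      simp only [Option.map_none, pvMerge_none_left]
      have hf4 : List.find? (fun col => PySem.Str.lower col == PySem.Str.lower f) (c :: cs) = List.find? (fun col => PySem.Str.lower col == PySem.Str.lower f) cs := by
        simp [List.find?_cons, h4]
      have hf5 : List.find? (fun col => PySem.Str.lower (PySem.Str.replace (PySem.Str.replace col " " "") "_" "") == PySem.Str.lower (PySem.Str.replace (PySem.Str.replace f " " "") "_" "")) (c :: cs) = List.find? (fun col => PySem.Str.lower (PySem.Str.replace (PySem.Str.replace col " " "") "_" "") == PySem.Str.lower (PySem.Str.replace (PySem.Str.replace f " " "") "_" "")) cs := by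
        simp [List.find?_cons, h5]
      simp [pvChar, List.contains_cons, n1, n2, n3, hf4, hf5]

theorem pvPorts_eq (f : String) (cs : List String) :
    find_column_match_py f cs = find_column_match_py_alt f cs := by
  simp only [find_column_match_py_alt]
  rw [pvMchar]
  simp only [find_column_match_py, pvChar]
  split_ifs <;>
    (try cases hA : List.find? (fun col => PySem.Str.lower col == PySem.Str.lower f) cs) <;>
    (try cases hB : List.find? (fun col => PySem.Str.lower (PySem.Str.replace (PySem.Str.replace col " " "") "_" "") == PySem.Str.lower (PySem.Str.replace (PySem.Str.replace f " " "") "_" "")) cs) <;>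
    simp_all

-- ===== VERDICT (by name: the statement is the Claim_ definition above) =====
theorem find_column_match_py_spec : Claim_equal_find_column_match_py := by
  intro field_name columns _
  unfold Spec_find_column_match_py
  exact pvPorts_eq field_name columns
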